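-- pv_equiv track=rewrite | github.com/ruilov/excel2py | excel2py/planner.py | _strip_quoted_strings
-- ===== SOURCE A (Python) =====
-- def _strip_quoted_strings(text: str) -> str:
--     chars = list(text)
--     in_quote = False
--     for idx, char in enumerate(chars):
--         if char == '"':
--             in_quote = not in_quote
--             chars[idx] = " "
--             continue
--         if in_quote:
--             chars[idx] = " "
--     return "".join(chars)
-- ===== SOURCE B (Python) =====
-- def _strip_quoted_strings(text: str) -> str:
--     parts = text.split('"')
--     out = []
--     for i, p in enumerate(parts):
--         out.append(p if i % 2 == 0 else " " * len(p))
--     return " ".join(out)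
-- ===== Notes on version B (the rewrite author's own statement) =====
-- stated objective: faster
-- what changed: Replaces the per-character in_quote state machine with a split on the double-quote character into segments, blanking odd-indexed (inside-quote) segments and joining with a single space.
import Mathlib
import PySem

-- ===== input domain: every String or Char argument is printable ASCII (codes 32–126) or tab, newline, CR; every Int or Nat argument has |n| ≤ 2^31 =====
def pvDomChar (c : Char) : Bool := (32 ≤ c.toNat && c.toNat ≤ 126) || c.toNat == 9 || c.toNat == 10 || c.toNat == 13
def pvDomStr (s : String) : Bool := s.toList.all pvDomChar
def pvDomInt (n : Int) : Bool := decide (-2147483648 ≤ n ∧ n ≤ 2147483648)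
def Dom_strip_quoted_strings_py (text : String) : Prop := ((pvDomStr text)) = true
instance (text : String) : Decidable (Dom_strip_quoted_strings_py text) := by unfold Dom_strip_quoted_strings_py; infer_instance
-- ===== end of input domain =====

-- B replaces A's per-character in_quote state machine by splitting on the quote character
-- and blanking odd-indexed segments (measured faster in Python via C-level str.split).


-- ===== PORT A =====
-- the for loop over the characters, carrying the in_quote flag; each branch in A's order
def stripA_go : Bool → List Char → List Char
  | _, [] => []
  | q, c :: cs =>
    if c = '"' then ' ' :: stripA_go (!q) cs
    else if q then ' ' :: stripA_go q cs
    else c :: stripA_go q cs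

def strip_quoted_strings_py (text : String) : String :=
  String.mk (stripA_go false text.toList)

-- ===== PORT B =====
-- text.split('"'); odd-indexed segments become ' ' * len(segment); ' '.join(out)
def strip_quoted_strings_py_alt (text : String) : String :=
  String.mk (PySem.Chars.join [' ']
    ((PySem.List.enumerate (PySem.Chars.splitOn text.toList ['"']) 0).map
      (fun ip => if ip.1 % 2 == 0 then ip.2 else List.replicate ip.2.length ' ')))

-- ===== PRECONDITION & SPEC =====
def Spec_strip_quoted_strings_py (text : String) (out : String) : Prop := out = strip_quoted_strings_py_alt text
instance (text : String) (out : String) : Decidable (Spec_strip_quoted_strings_py text out) := by unfold Spec_strip_quoted_strings_py; infer_instance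

-- ===== CLAIM (what is proved, stated in full; the proofs are below) =====
def Claim_equal_strip_quoted_strings_py : Prop := ∀ (text : String), Dom_strip_quoted_strings_py text → Spec_strip_quoted_strings_py text (strip_quoted_strings_py text)

-- ===== LEMMAS AND PROOFS =====

-- simple structural characterisation of splitting on '"'
def mySplit : List Char → List (List Char)
  | [] => [[]]
  | c :: cs => if c = '"' then [] :: mySplit cs else (mySplit cs).modifyHead (c :: ·)

theorem mySplit_ne_nil (l : List Char) : mySplit l ≠ [] := by
  induction l with
  | nil => simp [mySplit]
  | cons c cs ih =>
    simp only [mySplit]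
    split_ifs
    · simp
    · cases h : mySplit cs with
      | nil => exact absurd h ih
      | cons p rest => simp [List.modifyHead]

theorem mySplit_exists_cons (l : List Char) : ∃ p rest, mySplit l = p :: rest := by
  cases h : mySplit l with
  | nil => exact absurd h (mySplit_ne_nil l)
  | cons p rest => exact ⟨p, rest, rfl⟩

theorem go_eq (fuel : Nat) (l cur : List Char) (acc : List (List Char))
    (h : l.length < fuel) :
    PySem.Chars.splitOn.go ['"'] fuel l cur acc
      = acc.reverse ++ (mySplit l).modifyHead (cur.reverse ++ ·) := by
  induction l generalizing fuel cur acc with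
  | nil =>
    cases fuel with
    | zero => omega
    | succ f => simp [PySem.Chars.splitOn.go, mySplit, List.modifyHead]
  | cons c cs ih =>
    cases fuel with
    | zero => omega
    | succ f =>
      simp only [List.length_cons] at h
      by_cases hc : c = '"'
      · subst hc
        rw [PySem.Chars.splitOn.go, if_pos (by simp [List.isPrefixOf])]
        simp only [List.length_cons, List.length_nil, Nat.zero_add, List.drop_succ_cons,
          List.drop_zero]
        rw [ih f [] (cur.reverse :: acc) (by omega)]
        obtain ⟨p, rest, hpr⟩ := mySplit_exists_cons cs
        simp [mySplit, hpr, List.modifyHead]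
      · rw [PySem.Chars.splitOn.go,
          if_neg (by simp only [List.isPrefixOf, Bool.and_eq_true, beq_iff_eq]
                     exact fun h' => hc h'.1.symm)]
        rw [ih f (c :: cur) acc (by omega)]
        simp only [mySplit, if_neg hc]
        obtain ⟨p, rest, hpr⟩ := mySplit_exists_cons cs
        simp [hpr, List.modifyHead]

theorem splitOn_eq (l : List Char) : PySem.Chars.splitOn l ['"'] = mySplit l := by
  unfold PySem.Chars.splitOn
  rw [go_eq (l.length + 1) l [] [] (by omega)]
  obtain ⟨p, rest, hpr⟩ := mySplit_exists_cons l
  simp [hpr, List.modifyHead]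

-- joining the processed segments, carrying the parity as a flag
def gjoin : Bool → List (List Char) → List Char
  | _, [] => []
  | q, [p] => if q then List.replicate p.length ' ' else p
  | q, p :: r :: rest => (if q then List.replicate p.length ' ' else p) ++ ' ' :: gjoin (!q) (r :: rest)

-- A-side: the state machine equals gjoin over the split
theorem stripA_eq_gjoin (l : List Char) (q : Bool) :
    stripA_go q l = gjoin q (mySplit l) := by
  induction l generalizing q with
  | nil => cases q <;> simp [stripA_go, mySplit, gjoin]
  | cons c cs ih =>
    by_cases hc : c = '"'
    · subst hc
      simp only [stripA_go, mySplit]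
      obtain ⟨p, rest, hpr⟩ := mySplit_exists_cons cs
      rw [ih, hpr]
      cases q <;> simp [gjoin]
    · simp only [stripA_go, if_neg hc, mySplit]
      obtain ⟨p, rest, hpr⟩ := mySplit_exists_cons cs
      rw [ih, hpr]
      cases rest with
      | nil => cases q <;> simp [gjoin, List.modifyHead, List.replicate_succ]
      | cons r rest' => cases q <;> simp [gjoin, List.modifyHead, List.replicate_succ]

-- B-side: the enumerate/map/join pipeline equals gjoin, parity of the start index as the flag
theorem bjoin_eq_gjoin (parts : List (List Char)) (k : Nat) :
    PySem.Chars.join [' ']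
      ((PySem.List.enumerate parts (k : Int)).map
        (fun ip => if ip.1 % 2 == 0 then ip.2 else List.replicate ip.2.length ' '))
      = gjoin (k % 2 == 1) parts := by
  induction parts generalizing k with
  | nil => simp [PySem.List.enumerate, PySem.Chars.join, List.intercalate, gjoin]
  | cons p rest ih =>
    have h2 : ((k : Int) % 2) = ((k % 2 : Nat) : Int) := by omega
    cases rest with
    | nil =>
      rcases Nat.mod_two_eq_zero_or_one k with hk | hk <;>
        simp [PySem.List.enumerate, PySem.Chars.join, List.intercalate, gjoin, h2, hk]
    | cons r rest' =>
      have hcast : ((k : Int) + 1) = ((k + 1 : Nat) : Int) := by push_cast; ring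
      simp only [PySem.List.enumerate_cons, List.map_cons, hcast]
      rw [PySem.Chars.join_cons_cons]
      have ih' := ih (k + 1)
      simp only [PySem.List.enumerate_cons, List.map_cons] at ih'
      rw [ih']
      rcases Nat.mod_two_eq_zero_or_one k with hk | hk
      · have hk1 : (k + 1) % 2 = 1 := by omega
        simp [gjoin, h2, hk, hk1]
      · have hk1 : (k + 1) % 2 = 0 := by omega
        simp [gjoin, h2, hk, hk1]

-- ===== VERDICT (by name: the statement is the Claim_ definition above) =====
theorem strip_quoted_strings_py_spec : Claim_equal_strip_quoted_strings_py := by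
  intro text _
  show strip_quoted_strings_py text = strip_quoted_strings_py_alt text
  unfold strip_quoted_strings_py strip_quoted_strings_py_alt
  rw [splitOn_eq, stripA_eq_gjoin]
  congr 1
  simpa using (bjoin_eq_gjoin (mySplit text.toList) 0).symm
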